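-- pv_equiv track=rewrite | github.com/matbarc/aoc | 2024/python/day03.py | filter_disabled_ops
-- ===== SOURCE A (Python) =====
-- def filter_disabled_ops(ops: list[str]):
--     enabled_ops = []
--     is_enabled = True
--
--     for op in ops:
--         if op == "do()":
--             is_enabled = True
--         elif op == "don't()":
--             is_enabled = False
--         elif is_enabled:
--             enabled_ops.append(op)
--     return enabled_ops
-- ===== SOURCE B (Python) =====
-- def filter_disabled_ops(ops: list[str]):
--     # Marker-jumping scan: no enabled/disabled flag is tracked.  On a don't()
--     # we jump straight past the whole disabled block with list.index; enabled
--     # runs of non-marker ops are copied in one slice.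
--     out = []
--     i = 0
--     n = len(ops)
--     while i < n:
--         op = ops[i]
--         if op == "don't()":
--             try:
--                 i = ops.index("do()", i + 1) + 1
--             except ValueError:
--                 break
--         elif op == "do()":
--             i += 1
--         else:
--             j = i + 1
--             while j < n and ops[j] != "do()" and ops[j] != "don't()":
--                 j += 1
--             out += ops[i:j]
--             i = j
--     return out
-- ===== Notes on version B (the rewrite author's own statement) =====
-- stated objective: alternative
-- what changed: B drops A's running enabled flag entirely: it jumps over each disabled block with list.index (from a don't() straight past the matching do()) and copies each enabled run of non-marker ops with a single slice, instead of A's per-element state machine with an inline append.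
import Mathlib
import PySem

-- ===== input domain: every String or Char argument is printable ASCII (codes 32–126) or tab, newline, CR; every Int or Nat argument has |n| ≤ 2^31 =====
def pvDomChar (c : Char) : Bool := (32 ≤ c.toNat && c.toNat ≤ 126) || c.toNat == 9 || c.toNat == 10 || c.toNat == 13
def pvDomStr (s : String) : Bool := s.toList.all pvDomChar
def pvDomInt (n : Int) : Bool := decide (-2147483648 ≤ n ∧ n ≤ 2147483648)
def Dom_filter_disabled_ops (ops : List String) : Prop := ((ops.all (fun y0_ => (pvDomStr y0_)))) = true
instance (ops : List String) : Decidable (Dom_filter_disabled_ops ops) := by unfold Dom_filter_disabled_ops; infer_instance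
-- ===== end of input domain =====

-- B replaces A's per-element enabled-flag state machine by a marker-jumping
-- scan: it jumps past each disabled block to the do() closing it and copies
-- each enabled run with one slice (alternative decomposition, same cost).

-- ===== PORT A =====
def filter_disabled_ops (ops : List String) : List String :=
  (ops.foldl
    (fun (st : List String × Bool) op =>
      if op = "do()" then (st.1, true)
      else if op = "don't()" then (st.1, false)
      else if st.2 then (st.1 ++ [op], st.2)
      else st)
    ([], true)).1

-- ===== PORT B =====
-- hand port of Python's list.index(x, start) wrapped in try/except: offset of
-- the first occurrence of x in the given (already dropped) suffix, none if
-- absent (exact: ValueError <-> none, caught by B itself)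
def fdoFind (x : String) : List String → Option Nat
  | [] => none
  | y :: ys => if y = x then some 0 else (fdoFind x ys).map (· + 1)

-- B's inner while loop: first index j' ≥ j with a marker (or len(ops))
def fdoRun (ops : List String) (j : Nat) : Nat :=
  if h : j < ops.length then
    if ops[j] = "do()" ∨ ops[j] = "don't()" then j
    else fdoRun ops (j + 1)
  else j
termination_by ops.length - j

-- needed by fdoMain's termination proof
theorem fdoRun_ge (ops : List String) (j : Nat) : j ≤ fdoRun ops j := by
  rw [fdoRun]
  split
  · split
    · exact le_refl j
    · exact Nat.le_of_succ_le (fdoRun_ge ops (j + 1))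
  · exact le_refl j
termination_by ops.length - j

-- B's outer while loop over the index i, accumulating out
def fdoMain (ops : List String) (i : Nat) (out : List String) : List String :=
  if h : i < ops.length then
    if ops[i] = "don't()" then
      match fdoFind "do()" (ops.drop (i + 1)) with
      | none => out
      | some k => fdoMain ops (i + 1 + k + 1) out
    else if ops[i] = "do()" then fdoMain ops (i + 1) out
    else
      let j := fdoRun ops (i + 1)
      fdoMain ops j (out ++ (ops.drop i).take (j - i))
  else out
termination_by ops.length - i
decreasing_by
  · omega
  · omega
  · have := fdoRun_ge ops (i + 1); omega

def filter_disabled_ops_alt (ops : List String) : List String :=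
  fdoMain ops 0 []

-- ===== PRECONDITION & SPEC =====
def Spec_filter_disabled_ops (ops : List String) (out : List String) : Prop := out = filter_disabled_ops_alt ops
instance (ops : List String) (out : List String) : Decidable (Spec_filter_disabled_ops ops out) := by unfold Spec_filter_disabled_ops; infer_instance

-- ===== CLAIM (what is proved, stated in full; the proofs are below) =====
def Claim_equal_filter_disabled_ops : Prop := ∀ (ops : List String), Dom_filter_disabled_ops ops → Spec_filter_disabled_ops ops (filter_disabled_ops ops)

-- ===== LEMMAS AND PROOFS =====

-- the list appended by A's loop starting from state b
def loopA : List String → Bool → List String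
  | [], _ => []
  | x :: xs, b =>
      if x = "do()" then loopA xs true
      else if x = "don't()" then loopA xs false
      else if b then x :: loopA xs b else loopA xs b

theorem foldA_eq (ops : List String) : ∀ (acc : List String) (b : Bool),
    (ops.foldl
      (fun (st : List String × Bool) op =>
        if op = "do()" then (st.1, true)
        else if op = "don't()" then (st.1, false)
        else if st.2 then (st.1 ++ [op], st.2)
        else st)
      (acc, b)).1 = acc ++ loopA ops b := by
  induction ops with
  | nil => intro acc b; simp [loopA]
  | cons x xs ih =>
    intro acc b
    rw [List.foldl_cons]
    by_cases hdo : x = "do()"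
    · simp [hdo, loopA, ih]
    · by_cases hdont : x = "don't()"
      · simp [hdont, loopA, ih]
      · cases b with
        | true => simp [hdo, hdont, loopA, ih]
        | false => simp [hdo, hdont, loopA, ih]

-- in the disabled state, A skips to just past the next do()
theorem loopA_false (xs : List String) :
    loopA xs false =
      (match fdoFind "do()" xs with
       | none => []
       | some k => loopA (xs.drop (k + 1)) true) := by
  induction xs with
  | nil => simp [loopA, fdoFind]
  | cons x xs ih =>
    by_cases hdo : x = "do()"
    · simp [loopA, fdoFind, hdo]
    · by_cases hdont : x = "don't()"
      · simp only [loopA, fdoFind, if_neg hdo, if_pos hdont, ih]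
        cases fdoFind "do()" xs <;> simp
      · simp only [loopA, fdoFind, if_neg hdo, if_neg hdont, ih]
        cases fdoFind "do()" xs <;> simp

-- splitting off the leading run of non-marker ops in the enabled state
theorem run_split (ops : List String) (i : Nat) :
    loopA (ops.drop i) true =
      (ops.drop i).take (fdoRun ops i - i) ++ loopA (ops.drop (fdoRun ops i)) true := by
  rw [fdoRun]
  split
  · rename_i h
    split
    · simp
    · rename_i hm
      rw [not_or] at hm
      obtain ⟨hdo, hdont⟩ := hm
      have hdrop : ops.drop i = ops[i] :: ops.drop (i + 1) := List.drop_eq_getElem_cons h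
      have hge := fdoRun_ge ops (i + 1)
      rw [hdrop]
      have hstep : loopA (ops[i] :: ops.drop (i + 1)) true = ops[i] :: loopA (ops.drop (i + 1)) true := by
        simp [loopA, hdo, hdont]
      rw [hstep, run_split ops (i + 1)]
      have htake : (ops[i] :: ops.drop (i + 1)).take (fdoRun ops (i + 1) - i)
          = ops[i] :: (ops.drop (i + 1)).take (fdoRun ops (i + 1) - (i + 1)) := by
        have : fdoRun ops (i + 1) - i = (fdoRun ops (i + 1) - (i + 1)) + 1 := by omega
        rw [this, List.take_succ_cons]
      rw [htake]
      simp
  · simp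
termination_by ops.length - i

theorem fdoMain_eq (ops : List String) : ∀ (i : Nat) (out : List String),
    fdoMain ops i out = out ++ loopA (ops.drop i) true := by
  intro i out
  rw [fdoMain]
  split
  · rename_i h
    have hdrop : ops.drop i = ops[i] :: ops.drop (i + 1) := List.drop_eq_getElem_cons h
    by_cases hdont : ops[i] = "don't()"
    · simp only [if_pos hdont]
      rw [hdrop]
      have : loopA (ops[i] :: ops.drop (i + 1)) true = loopA (ops.drop (i + 1)) false := by
        simp [loopA, hdont]
      rw [this, loopA_false]
      cases hfind : fdoFind "do()" (ops.drop (i + 1)) with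
      | none => simp
      | some k =>
        simp only
        rw [fdoMain_eq ops (i + 1 + k + 1) out, List.drop_drop]
        congr 2
    · by_cases hdo : ops[i] = "do()"
      · simp only [if_neg hdont, if_pos hdo]
        rw [fdoMain_eq ops (i + 1) out, hdrop]
        have : loopA (ops[i] :: ops.drop (i + 1)) true = loopA (ops.drop (i + 1)) true := by
          simp [loopA, hdo]
        rw [this]
      · simp only [if_neg hdont, if_neg hdo]
        have hrunstep : fdoRun ops i = fdoRun ops (i + 1) := by
          rw [fdoRun]; simp [h, hdo, hdont]
        rw [fdoMain_eq ops (fdoRun ops (i + 1)) _, List.append_assoc]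
        rw [run_split ops i, hrunstep]
  · rename_i h
    have hnil : ops.drop i = [] := List.drop_eq_nil_of_le (by omega)
    simp [hnil, loopA]
termination_by i => ops.length - i
decreasing_by
  all_goals (have := fdoRun_ge ops (i + 1); omega)

-- ===== VERDICT (by name: the statement is the Claim_ definition above) =====
theorem filter_disabled_ops_spec : Claim_equal_filter_disabled_ops := by
  intro ops _
  unfold Spec_filter_disabled_ops filter_disabled_ops filter_disabled_ops_alt
  rw [foldA_eq, fdoMain_eq]
  simp
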